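-- pv_equiv track=rewrite | github.com/howekatie/slotter | slotter/views.py | combo_lookup_dict_pk
-- ===== SOURCE A (Python) =====
-- def combo_lookup_dict_pk(pk_lookup_dict, pk_working_combos):
--     combo_dict = {}
--     for pk in pk_lookup_dict:
--         combo_list = []
--         for combo in pk_working_combos:
--             if pk in combo:
--                 combo_list.append(combo)
--         combo_dict[pk] = combo_list
--     return combo_dict
-- ===== SOURCE B (Python) =====
-- def combo_lookup_dict_pk(pk_lookup_dict, pk_working_combos):
--     combo_dict = {pk: [] for pk in pk_lookup_dict}
--     for combo in pk_working_combos: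
--         for pk in dict.fromkeys(combo):
--             if pk in combo_dict:
--                 combo_dict[pk].append(combo)
--     return combo_dict
-- ===== Notes on version B (the rewrite author's own statement) =====
-- stated objective: faster
-- what changed: Instead of scanning every combo once per pk (nested loops), B pre-fills pk -> [] and makes a single pass over the combos, appending each combo to the buckets of the distinct pks it contains.
import Mathlib
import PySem

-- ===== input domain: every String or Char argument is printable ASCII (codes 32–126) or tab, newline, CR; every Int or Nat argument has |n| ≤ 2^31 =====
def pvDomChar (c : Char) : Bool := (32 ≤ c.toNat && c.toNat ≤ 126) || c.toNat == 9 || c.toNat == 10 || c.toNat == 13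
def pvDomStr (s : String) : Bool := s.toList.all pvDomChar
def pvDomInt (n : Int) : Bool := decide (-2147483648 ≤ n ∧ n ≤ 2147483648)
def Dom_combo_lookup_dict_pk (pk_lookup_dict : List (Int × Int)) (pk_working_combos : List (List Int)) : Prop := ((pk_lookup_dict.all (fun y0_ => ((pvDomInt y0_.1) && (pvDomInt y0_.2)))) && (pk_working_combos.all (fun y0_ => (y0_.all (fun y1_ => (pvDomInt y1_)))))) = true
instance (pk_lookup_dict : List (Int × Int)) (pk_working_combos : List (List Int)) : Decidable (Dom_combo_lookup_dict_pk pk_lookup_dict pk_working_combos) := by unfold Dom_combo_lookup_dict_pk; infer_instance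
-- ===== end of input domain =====

-- B replaces A's per-pk scan of all combos by one pass over the combos that appends each combo
-- to the buckets of the distinct pks it contains (asymptotically faster: O(P + sum|combo|)).

-- ===== PORT A =====
-- 'for pk in pk_lookup_dict' iterates the dict's keys in insertion order with the
-- first occurrence kept: PySem.List.dedup of the key column.
def combo_lookup_dict_pk (pk_lookup_dict : List (Int × Int)) (pk_working_combos : List (List Int)) : List (Int × List (List Int)) :=
  ((PySem.List.dedup (pk_lookup_dict.map Prod.fst)).foldl
    (fun (combo_dict : PySem.Dict Int (List (List Int))) pk =>
      combo_dict.insert pk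
        (pk_working_combos.foldl
          (fun combo_list combo => if pk ∈ combo then combo_list ++ [combo] else combo_list) []))
    PySem.Dict.empty).items

-- ===== PORT B =====
-- 'dict.fromkeys(combo)' is PySem.List.dedup combo.
def combo_lookup_dict_pk_alt (pk_lookup_dict : List (Int × Int)) (pk_working_combos : List (List Int)) : List (Int × List (List Int)) :=
  let init : PySem.Dict Int (List (List Int)) :=
    (PySem.List.dedup (pk_lookup_dict.map Prod.fst)).foldl
      (fun combo_dict pk => combo_dict.insert pk []) PySem.Dict.empty
  (pk_working_combos.foldl
    (fun combo_dict combo =>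
      (PySem.List.dedup combo).foldl
        (fun (cd : PySem.Dict Int (List (List Int))) pk =>
          if cd.contains pk then cd.modify pk [] (· ++ [combo]) else cd)
        combo_dict)
    init).items

-- ===== PRECONDITION & SPEC =====
def Spec_combo_lookup_dict_pk (pk_lookup_dict : List (Int × Int)) (pk_working_combos : List (List Int)) (out : List (Int × List (List Int))) : Prop := out = combo_lookup_dict_pk_alt pk_lookup_dict pk_working_combos
instance (pk_lookup_dict : List (Int × Int)) (pk_working_combos : List (List Int)) (out : List (Int × List (List Int))) : Decidable (Spec_combo_lookup_dict_pk pk_lookup_dict pk_working_combos out) := by unfold Spec_combo_lookup_dict_pk; infer_instance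

-- ===== CLAIM (what is proved, stated in full; the proofs are below) =====
def Claim_equal_combo_lookup_dict_pk : Prop := ∀ (pk_lookup_dict : List (Int × Int)) (pk_working_combos : List (List Int)), Dom_combo_lookup_dict_pk pk_lookup_dict pk_working_combos → Spec_combo_lookup_dict_pk pk_lookup_dict pk_working_combos (combo_lookup_dict_pk pk_lookup_dict pk_working_combos)

-- ===== LEMMAS AND PROOFS =====

-- Filling an empty dict with fresh (nodup) keys appends the pairs in order.
theorem pv_fill (ks : List Int) (F : Int → List (List Int)) (L : List (Int × List (List Int)))
    (hd : ∀ k ∈ ks, ∀ p ∈ L, p.1 ≠ k) (hn : ks.Nodup) :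
    ks.foldl (fun (cd : PySem.Dict Int (List (List Int))) pk => cd.insert pk (F pk))
      (PySem.Dict.mk L) = PySem.Dict.mk (L ++ ks.map (fun k => (k, F k))) := by
  induction ks generalizing L with
  | nil => simp
  | cons p t ih =>
    simp only [List.foldl_cons]
    have hc : (PySem.Dict.mk L).contains p = false := by
      simp only [PySem.Dict.contains, List.any_eq_false]
      intro q hq
      simpa using hd p (by simp) q hq
    rw [show (PySem.Dict.mk L).insert p (F p) = PySem.Dict.mk (L ++ [(p, F p)]) by
      simp [PySem.Dict.insert, hc]]
    rw [ih (L ++ [(p, F p)])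
      (by
        intro k hk q hq
        rcases List.mem_append.1 hq with h | h
        · exact hd k (by simp [hk]) q h
        · simp only [List.mem_singleton] at h
          subst h
          simp only [List.nodup_cons] at hn
          intro he; exact hn.1 (by simpa [← he] using hk))
      (by simp_all)]
    simp

-- getD on a dict in map form reads off the function.
theorem pv_getD_map (ks : List Int) (G : Int → List (List Int)) (p : Int) (hp : p ∈ ks) :
    (PySem.Dict.mk (ks.map (fun k => (k, G k)))).getD p [] = G p := by
  induction ks with
  | nil => simp at hp
  | cons a t ih =>
    by_cases h : a = p
    · subst h; simp [PySem.Dict.getD, PySem.Dict.get?]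
    · have hp' : p ∈ t := by
        rcases List.mem_cons.1 hp with h' | h'
        · exact absurd h'.symm h
        · exact h'
      simpa [PySem.Dict.getD, PySem.Dict.get?, h] using ih hp'

-- contains on a dict in map form is list membership of the key.
theorem pv_contains_map (ks : List Int) (G : Int → List (List Int)) (p : Int) :
    (PySem.Dict.mk (ks.map (fun k => (k, G k)))).contains p = decide (p ∈ ks) := by
  simp only [PySem.Dict.contains, List.any_map]
  by_cases h : p ∈ ks
  · simp only [h, decide_true, List.any_eq_true]
    exact ⟨p, h, by simp⟩
  · simp only [h, decide_false, List.any_eq_false]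
    intro k hk
    simp only [Function.comp_apply, beq_iff_eq]
    intro he; exact h (he ▸ hk)

-- appending one combo to the bucket of every distinct pk it contains, in map form
theorem pv_inner (ds ks : List Int) (G : Int → List (List Int)) (c : List Int) (hn : ds.Nodup) :
    (ds.foldl (fun (cd : PySem.Dict Int (List (List Int))) pk =>
        if cd.contains pk then cd.modify pk [] (· ++ [c]) else cd)
      (PySem.Dict.mk (ks.map (fun k => (k, G k)))))
    = PySem.Dict.mk (ks.map (fun k => (k, G k ++ if k ∈ ds then [c] else []))) := by
  induction ds generalizing G with
  | nil => simp
  | cons p t ih =>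
    simp only [List.nodup_cons] at hn
    simp only [List.foldl_cons, pv_contains_map]
    by_cases hp : p ∈ ks
    · rw [if_pos (by simpa using hp)]
      have hm : (PySem.Dict.mk (ks.map (fun k => (k, G k)))).modify p [] (· ++ [c])
          = PySem.Dict.mk (ks.map (fun k => (k, if k = p then G k ++ [c] else G k))) := by
        simp only [PySem.Dict.modify, pv_getD_map ks G p hp, PySem.Dict.insert,
          pv_contains_map, hp, decide_true, if_true]
        congr 1
        rw [List.map_map]
        apply List.map_congr_left
        intro k _
        by_cases hk : k = p
        · subst hk; simp
        · simp [hk]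
      rw [hm, ih (fun k => if k = p then G k ++ [c] else G k) hn.2]
      congr 1
      apply List.map_congr_left
      intro k _
      by_cases hk : k = p
      · subst hk; simp [hn.1]
      · simp [hk]
    · rw [if_neg (by simpa using hp)]
      rw [ih G hn.2]
      congr 1
      apply List.map_congr_left
      intro k hk
      have : k ≠ p := fun he => hp (he ▸ hk)
      simp [this]

-- the one-pass loop of B, run from a map-form dict, computes the per-key filters
theorem pv_outer (cs : List (List Int)) (ks : List Int) (G : Int → List (List Int)) :
    (cs.foldl (fun (combo_dict : PySem.Dict Int (List (List Int))) combo =>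
        (PySem.List.dedup combo).foldl
          (fun cd pk => if cd.contains pk then cd.modify pk [] (· ++ [combo]) else cd)
          combo_dict)
      (PySem.Dict.mk (ks.map (fun k => (k, G k)))))
    = PySem.Dict.mk (ks.map (fun k => (k, G k ++ cs.filter (fun c => decide (k ∈ c))))) := by
  induction cs generalizing G with
  | nil => simp
  | cons c t ih =>
    simp only [List.foldl_cons]
    rw [pv_inner (PySem.List.dedup c) ks G c (PySem.List.nodup_dedup c)]
    rw [ih (fun k => G k ++ if k ∈ PySem.List.dedup c then [c] else [])]
    congr 1
    apply List.map_congr_left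
    intro k _
    simp only [PySem.List.mem_dedup, List.filter_cons]
    by_cases hk : k ∈ c
    · simp [hk]
    · simp [hk]

-- ===== VERDICT (by name: the statement is the Claim_ definition above) =====
theorem combo_lookup_dict_pk_spec : Claim_equal_combo_lookup_dict_pk := by
  intro d cs _
  unfold Spec_combo_lookup_dict_pk combo_lookup_dict_pk combo_lookup_dict_pk_alt
  dsimp only [PySem.Dict.empty]
  have hn := PySem.List.nodup_dedup (d.map Prod.fst)
  rw [pv_fill _ _ [] (by simp) hn, pv_fill _ (fun _ => ([] : List (List Int))) [] (by simp) hn]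
  simp only [List.nil_append]
  rw [pv_outer cs _ (fun _ => ([] : List (List Int)))]
  apply List.map_congr_left
  intro k _
  rw [PySem.List.foldl_append_ite_eq_filter]
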